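-- pv_equiv track=rewrite | github.com/SafonovVladimir/mornings | 04 april/11/3.py | max_increase
-- ===== SOURCE A (Python) =====
-- def max_increase(grid: list) -> int:
--     n = len(grid)
--     row_max = [max(row) for row in grid]  # максимальні висоти на кожному рядку
--     col_max = [max(col) for col in
--                zip(*grid)]  # максимальні висоти на кожному стовпці
--     result = 0
--     for i in range(n):
--         for j in range(n):
--             result += min(row_max[i], col_max[j]) - grid[i][j]
--     return result
-- ===== SOURCE B (Python) =====
-- def _bisect_right(a, x):
--     # index splitting sorted a into elements <= x and elements > x
--     if not a:
--         return 0
--     mid = len(a) // 2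
--     if x < a[mid]:
--         return _bisect_right(a[:mid], x)
--     return mid + 1 + _bisect_right(a[mid + 1:], x)
--
--
-- def max_increase(grid: list) -> int:
--     n = len(grid)
--     row_max = [max(row) for row in grid]
--     col_max = [max(row[j] for row in grid) for j in range(n)]
--     scol = sorted(col_max)
--     prefix = [0]
--     s = 0
--     for c in scol:
--         s += c
--         prefix.append(s)
--     total = sum(row[j] for row in grid for j in range(n))
--     pair = 0
--     for r in row_max:
--         k = _bisect_right(scol, r)
--         pair += prefix[k] + r * (n - k)
--     return pair - total
-- ===== Notes on version B (the rewrite author's own statement) =====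
-- stated objective: alternative
-- what changed: Instead of taking min(row_max[i], col_max[j]) cell by cell in a nested loop, B sorts col_max once, builds a prefix-sum array, and for each row maximum splits the sorted column maxima with a hand-written binary search (prefix sum of those <= r plus r times the count above), then subtracts the grid total computed in its own pass.
import Mathlib
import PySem

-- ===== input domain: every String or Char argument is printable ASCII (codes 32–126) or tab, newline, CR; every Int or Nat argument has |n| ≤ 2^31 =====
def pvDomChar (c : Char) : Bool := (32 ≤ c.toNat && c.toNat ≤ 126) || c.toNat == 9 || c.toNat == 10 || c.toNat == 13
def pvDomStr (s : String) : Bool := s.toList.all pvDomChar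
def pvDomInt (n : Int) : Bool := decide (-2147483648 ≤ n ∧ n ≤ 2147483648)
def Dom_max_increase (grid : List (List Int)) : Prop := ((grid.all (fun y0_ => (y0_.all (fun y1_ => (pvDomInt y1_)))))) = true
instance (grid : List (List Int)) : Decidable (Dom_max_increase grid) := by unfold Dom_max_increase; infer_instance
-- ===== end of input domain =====

-- B replaces A's inner pass over columns by sorting col_max once with a prefix-sum array and a
-- hand-written binary search per row, subtracting the grid total in its own pass; same value everywhere A returns.


-- ===== PORT A =====
-- Python max(xs) on a list of ints; Pre_ guarantees xs is nonempty wherever either program calls it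
def pyMaxI (xs : List Int) : Int := (PySem.List.max? xs (fun x => x)).getD 0

-- zip(*rows): transpose stopping at the shortest row (empty when rows is empty, like zip())
def zipStar (rows : List (List Int)) : List (List Int) :=
  if h : rows = [] ∨ rows.any (·.isEmpty) = true then []
  else (rows.map (fun r => r.headD 0)) :: zipStar (rows.map (fun r => r.tail))
termination_by (rows.headD []).length
decreasing_by
  rw [not_or] at h
  obtain ⟨h1, h2⟩ := h
  cases rows with
  | nil => exact absurd rfl h1
  | cons r rs =>
    simp only [List.headD_cons]
    have hr : r ≠ [] := by
      intro hre
      exact h2 (by simp [hre])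
    cases r with
    | nil => exact absurd rfl hr
    | cons a t => simp

def max_increase (grid : List (List Int)) : Int :=
  let n : Int := grid.length
  let row_max := grid.map (fun row => pyMaxI row)
  let col_max := (zipStar grid).map (fun col => pyMaxI col)
  (PySem.List.pyRange 0 n 1).foldl (fun result i =>
    (PySem.List.pyRange 0 n 1).foldl (fun result j =>
      result + (min (PySem.List.pyGetD row_max i 0) (PySem.List.pyGetD col_max j 0)
                 - PySem.List.pyGetD (PySem.List.pyGetD grid i []) j 0)) result) 0

-- ===== PORT B =====
-- hand-written recursive bisect_right from Source B; a[:mid] / a[mid+1:] are take / drop,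
-- mid = len(a) // 2 written inline, a[mid] is getD (mid < len(a) always, so getD is exact)
def bisectR (a : List Int) (x : Int) : Nat :=
  if h : a = [] then 0
  else if x < a.getD (a.length / 2) 0 then bisectR (a.take (a.length / 2)) x
  else a.length / 2 + 1 + bisectR (a.drop (a.length / 2 + 1)) x
termination_by a.length
decreasing_by
  · have : 0 < a.length := List.length_pos_iff.mpr h
    simp only [List.length_take]
    omega
  · have : 0 < a.length := List.length_pos_iff.mpr h
    simp only [List.length_drop]
    omega

def max_increase_alt (grid : List (List Int)) : Int :=
  let n : Int := grid.length
  let row_max := grid.map (fun row => pyMaxI row)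
  let col_max := (PySem.List.pyRange 0 n 1).map (fun j =>
      pyMaxI (grid.map (fun row => PySem.List.pyGetD row j 0)))
  let scol := PySem.List.sorted col_max (fun x => x) false
  let pref := (scol.foldl (fun (st : List Int × Int) c => (st.1 ++ [st.2 + c], st.2 + c)) ([0], 0)).1
  let total := grid.foldl (fun acc row =>
      (PySem.List.pyRange 0 n 1).foldl (fun a j => a + PySem.List.pyGetD row j 0) acc) 0
  let pair := row_max.foldl (fun acc r =>
      acc + (PySem.List.pyGetD pref ((bisectR scol r : Nat) : Int) 0
             + r * (n - ((bisectR scol r : Nat) : Int)))) 0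
  pair - total

-- ===== PRECONDITION & SPEC =====
-- Pre_ excludes exactly the inputs where Python A raises: a row shorter than len(grid)
-- (IndexError on grid[i][j] / col_max[j], or ValueError from max() of an empty row).
def Pre_max_increase (grid : List (List Int)) : Prop :=
  ∀ row ∈ grid, grid.length ≤ row.length
instance (grid : List (List Int)) : Decidable (Pre_max_increase grid) := by
  unfold Pre_max_increase; infer_instance

def pvWitness_max_increase : List (List Int) := [[3, 0, 8, 4], [2, 4, 5, 7], [9, 2, 6, 3], [0, 3, 1, 0]]

def Spec_max_increase (grid : List (List Int)) (out : Int) : Prop := out = max_increase_alt grid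
instance (grid : List (List Int)) (out : Int) : Decidable (Spec_max_increase grid out) := by unfold Spec_max_increase; infer_instance

-- ===== CLAIM (what is proved, stated in full; the proofs are below) =====
def Claim_equal_max_increase : Prop := ∀ (grid : List (List Int)), Dom_max_increase grid → Pre_max_increase grid → Spec_max_increase grid (max_increase grid)

-- ===== LEMMAS AND PROOFS =====

-- max of column j, and the common double-sum both ports are reduced to
def colMaxAt (grid : List (List Int)) (j : Nat) : Int :=
  pyMaxI (grid.map (fun row => row.getD j 0))

def SSum (grid : List (List Int)) : Int :=
  ((List.range grid.length).map (fun i =>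
    ((List.range grid.length).map (fun j =>
      min ((grid.map (fun row => pyMaxI row)).getD i 0) (colMaxAt grid j)
        - (grid.getD i []).getD j 0)).sum)).sum

lemma map_getD_range {α : Type} (l : List α) (d : α) :
    (List.range l.length).map (fun i => l.getD i d) = l := by
  apply List.ext_getElem
  · simp
  · intro i h1 h2
    simp [List.getD_eq_getElem?_getD, List.getElem?_eq_getElem h2]

lemma foldl_add_sum {α : Type} (l : List α) (f : α → Int) (init : Int) :
    l.foldl (fun acc x => acc + f x) init = init + (l.map f).sum := by
  induction l generalizing init with
  | nil => simp
  | cons a t ih => simp [List.foldl_cons, ih]; ring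

lemma sum_map_sub {α : Type} (l : List α) (f g : α → Int) :
    (l.map (fun x => f x - g x)).sum = (l.map f).sum - (l.map g).sum := by
  induction l with
  | nil => simp
  | cons a t ih => simp [ih]; ring

-- zipStar element j is column j, whenever every row is long enough
lemma zipStar_getElem? (rows : List (List Int)) (j : Nat)
    (hne : rows ≠ []) (hlen : ∀ r ∈ rows, j < r.length) :
    (zipStar rows)[j]? = some (rows.map (fun r => r.getD j 0)) := by
  induction j generalizing rows with
  | zero =>
    rw [zipStar]
    have hc : ¬ (rows = [] ∨ rows.any (·.isEmpty) = true) := by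
      rw [not_or]
      refine ⟨hne, ?_⟩
      rw [List.any_eq_true]
      rintro ⟨r, hr, he⟩
      have h0 := hlen r hr
      rw [List.isEmpty_iff] at he
      subst he
      simp at h0
    rw [dif_neg hc]
    simp only [List.getElem?_cons_zero, Option.some.injEq]
    apply List.map_congr_left
    intro r hr
    cases r with
    | nil => exact absurd (hlen [] hr) (by simp)
    | cons a t => rfl
  | succ j ih =>
    rw [zipStar]
    have hc : ¬ (rows = [] ∨ rows.any (·.isEmpty) = true) := by
      rw [not_or]
      refine ⟨hne, ?_⟩
      rw [List.any_eq_true]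
      rintro ⟨r, hr, he⟩
      have h0 := hlen r hr
      rw [List.isEmpty_iff] at he
      subst he
      simp at h0
    rw [dif_neg hc]
    simp only [List.getElem?_cons_succ]
    rw [ih]
    · congr 1
      rw [List.map_map]
      apply List.map_congr_left
      intro r hr
      cases r with
      | nil => exact absurd (hlen [] hr) (by simp)
      | cons a t => simp
    · simpa using hne
    · intro r' hr'
      obtain ⟨r, hr, rfl⟩ := List.mem_map.mp hr'
      have h0 := hlen r hr
      cases r with
      | nil => simp at h0
      | cons a t => simp at h0 ⊢; omega

-- bisectR index spec
lemma bisectR_le (a : List Int) (x : Int) : bisectR a x ≤ a.length := by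
  induction a using bisectR.induct x with
  | case1 => simp [bisectR]
  | case2 a h hlt ih =>
    rw [bisectR, dif_neg h, if_pos hlt]
    have := List.length_take_le (a.length / 2) a
    omega
  | case3 a h hlt ih =>
    rw [bisectR, dif_neg h, if_neg hlt]
    have h0 : 0 < a.length := List.length_pos_iff.mpr h
    simp only [List.length_drop] at ih
    omega

lemma bisectR_spec (a : List Int) (x : Int) (hs : a.Pairwise (· ≤ ·)) :
    (∀ i (h : i < a.length), i < bisectR a x → a[i] ≤ x) ∧
    (∀ i (h : i < a.length), bisectR a x ≤ i → x < a[i]) := by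
  induction a using bisectR.induct x with
  | case1 => constructor <;> intro i h <;> simp at h
  | case2 a h hlt ih =>
    have h0 : 0 < a.length := List.length_pos_iff.mpr h
    have hmid : a.length / 2 < a.length := by omega
    have hget : a.getD (a.length / 2) 0 = a[a.length / 2] := List.getD_eq_getElem a 0 hmid
    have hpw := List.pairwise_iff_getElem.mp hs
    have htk : (a.take (a.length / 2)).Pairwise (· ≤ ·) :=
      hs.sublist (List.take_sublist _ _)
    obtain ⟨ih1, ih2⟩ := ih htk
    have hkle := bisectR_le (a.take (a.length / 2)) x
    simp only [List.length_take] at hkle ih1 ih2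
    rw [bisectR, dif_neg h, if_pos hlt]
    rw [hget] at hlt
    constructor
    · intro i hi hik
      have := ih1 i (by simp; omega) hik
      simpa [List.getElem_take] using this
    · intro i hi hki
      by_cases hcase : i < a.length / 2
      · have := ih2 i (by simp; omega) hki
        simpa [List.getElem_take] using this
      · rcases Nat.eq_or_lt_of_le (Nat.le_of_not_lt hcase) with heq | hlt2
        · subst heq; exact hlt
        · exact lt_of_lt_of_le hlt (hpw _ _ hmid hi hlt2)
  | case3 a h hlt ih =>
    have h0 : 0 < a.length := List.length_pos_iff.mpr h
    have hmid : a.length / 2 < a.length := by omega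
    have hget : a.getD (a.length / 2) 0 = a[a.length / 2] := List.getD_eq_getElem a 0 hmid
    have hpw := List.pairwise_iff_getElem.mp hs
    have hdr : (a.drop (a.length / 2 + 1)).Pairwise (· ≤ ·) :=
      hs.sublist (List.drop_sublist _ _)
    obtain ⟨ih1, ih2⟩ := ih hdr
    have hkle := bisectR_le (a.drop (a.length / 2 + 1)) x
    simp only [List.length_drop] at hkle ih1 ih2
    rw [bisectR, dif_neg h, if_neg hlt]
    rw [hget] at hlt
    rw [not_lt] at hlt
    constructor
    · intro i hi hik
      by_cases hcase : i ≤ a.length / 2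
      · rcases Nat.eq_or_lt_of_le hcase with heq | hlt2
        · subst heq; exact hlt
        · exact le_trans (hpw _ _ hi hmid hlt2) hlt
      · have hi2 : i - (a.length / 2 + 1) < a.length - (a.length / 2 + 1) := by omega
        have := ih1 (i - (a.length / 2 + 1)) (by simpa using hi2) (by omega)
        rw [List.getElem_drop] at this
        have heq : a.length / 2 + 1 + (i - (a.length / 2 + 1)) = i := by omega
        simpa [heq] using this
    · intro i hi hki
      have hi2 : i - (a.length / 2 + 1) < a.length - (a.length / 2 + 1) := by omega
      have := ih2 (i - (a.length / 2 + 1)) (by simpa using hi2) (by omega)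
      rw [List.getElem_drop] at this
      have heq : a.length / 2 + 1 + (i - (a.length / 2 + 1)) = i := by omega
      simpa [heq] using this

-- sum of min r over a list split at k
lemma minsum_split (s : List Int) (r : Int) (k : Nat) (hk : k ≤ s.length)
    (h1 : ∀ i (h : i < s.length), i < k → s[i] ≤ r)
    (h2 : ∀ i (h : i < s.length), k ≤ i → r < s[i]) :
    (s.map (fun c => min r c)).sum = (s.take k).sum + r * ((s.length - k : Nat) : Int) := by
  have hsplit : s = s.take k ++ s.drop k := (List.take_append_drop k s).symm
  have htake : (s.take k).map (fun c => min r c) = s.take k := by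
    apply List.ext_getElem
    · simp
    · intro i hh1 hh2
      simp only [List.getElem_map, List.getElem_take]
      exact min_eq_right (h1 i (by simp at hh2; omega) (by simp at hh2; omega))
  have hdrop : (s.drop k).map (fun c => min r c) = List.replicate (s.length - k) r := by
    apply List.ext_getElem
    · simp
    · intro i hh1 hh2
      simp only [List.getElem_map, List.getElem_drop, List.getElem_replicate]
      exact min_eq_left (le_of_lt (h2 (k + i) (by simp at hh1; omega) (by omega)))
  calc (s.map (fun c => min r c)).sum
      = ((s.take k).map (fun c => min r c)).sum + ((s.drop k).map (fun c => min r c)).sum := by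
        conv_lhs => rw [hsplit]
        simp
    _ = (s.take k).sum + r * ((s.length - k : Nat) : Int) := by
        rw [htake, hdrop, List.sum_replicate]
        simp [mul_comm]

-- the prefix-sum loop of Source B, in closed form
lemma pref_foldl (l : List Int) (acc : List Int) (s : Int) :
    (l.foldl (fun (st : List Int × Int) c => (st.1 ++ [st.2 + c], st.2 + c)) (acc, s)).1
      = acc ++ (List.range l.length).map (fun i => s + (l.take (i + 1)).sum) := by
  induction l generalizing acc s with
  | nil => simp
  | cons c t ih =>
    simp only [List.foldl_cons]
    rw [ih, List.append_assoc]
    congr 1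
    rw [List.length_cons, List.range_succ_eq_map, List.map_cons, List.map_map]
    simp only [List.singleton_append, List.sum_cons, List.take_zero,
      List.sum_nil, Function.comp_def, List.take_succ_cons, add_zero]
    congr 1
    apply List.map_congr_left
    intro i _
    ring

lemma pref_getD (l : List Int) (k : Nat) (hk : k ≤ l.length) :
    PySem.List.pyGetD ((l.foldl (fun (st : List Int × Int) c => (st.1 ++ [st.2 + c], st.2 + c)) ([0], 0)).1) (k : Int) 0
      = (l.take k).sum := by
  rw [pref_foldl, PySem.List.pyGetD_natCast]
  cases k with
  | zero => simp
  | succ k =>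
    rw [List.getD_eq_getElem?_getD, List.getElem?_append_right (by simp)]
    simp only [List.length_cons, List.length_nil]
    rw [List.getElem?_map, List.getElem?_range (by omega)]
    simp

-- per-row term of B's pair loop = sum of min r over col_max
lemma pair_term (cm : List Int) (r : Int) :
    PySem.List.pyGetD (((PySem.List.sorted cm (fun x => x) false).foldl
        (fun (st : List Int × Int) c => (st.1 ++ [st.2 + c], st.2 + c)) ([0], 0)).1)
        ((bisectR (PySem.List.sorted cm (fun x => x) false) r : Nat) : Int) 0
      + r * ((cm.length : Int) - ((bisectR (PySem.List.sorted cm (fun x => x) false) r : Nat) : Int))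
      = (cm.map (fun c => min r c)).sum := by
  set scol := PySem.List.sorted cm (fun x => x) false with hscol
  have hlen : scol.length = cm.length := PySem.List.length_sorted cm _ _
  have hpw : scol.Pairwise (· ≤ ·) := PySem.List.sorted_pairwise cm (fun x => x) 
  have hk := bisectR_le scol r
  obtain ⟨hsp1, hsp2⟩ := bisectR_spec scol r hpw
  rw [pref_getD scol _ hk]
  have hmin := minsum_split scol r (bisectR scol r) hk hsp1 hsp2
  have hperm : (scol.map (fun c => min r c)).sum = (cm.map (fun c => min r c)).sum :=
    List.Perm.sum_eq (List.Perm.map _ (PySem.List.sorted_perm cm _ _))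
  rw [← hperm, hmin, hlen]
  have : ((cm.length - bisectR scol r : Nat) : Int)
      = (cm.length : Int) - ((bisectR scol r : Nat) : Int) := by
    rw [← hlen]
    push_cast [Nat.cast_sub hk]
    ring
  rw [this]

-- A reduces to the common double sum
lemma A_eq (grid : List (List Int)) (hpre : Pre_max_increase grid) :
    max_increase grid = SSum grid := by
  unfold max_increase SSum
  have hcm : ∀ j < grid.length,
      ((zipStar grid).map (fun col => pyMaxI col)).getD j 0 = colMaxAt grid j := by
    intro j hj
    have hne : grid ≠ [] := by
      intro hgr
      rw [hgr] at hj
      simp at hj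
    have hlen : ∀ r ∈ grid, j < r.length := fun r hr => lt_of_lt_of_le hj (hpre r hr)
    rw [List.getD_eq_getElem?_getD, List.getElem?_map, zipStar_getElem? grid j hne hlen]
    rfl
  simp only [PySem.List.pyRange_zero_nat, List.foldl_map, PySem.List.pyGetD_natCast]
  have hinner : ∀ (res : Int) (i : Nat),
      (List.range grid.length).foldl (fun r j =>
        r + (min ((grid.map (fun row => pyMaxI row)).getD i 0)
              (((zipStar grid).map (fun col => pyMaxI col)).getD j 0)
            - (grid.getD i []).getD j 0)) res
      = res + ((List.range grid.length).map (fun j =>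
          min ((grid.map (fun row => pyMaxI row)).getD i 0)
              (((zipStar grid).map (fun col => pyMaxI col)).getD j 0)
            - (grid.getD i []).getD j 0)).sum :=
    fun res i => foldl_add_sum _ _ _
  simp only [hinner]
  rw [foldl_add_sum, zero_add]
  apply congrArg
  apply List.map_congr_left
  intro i hi
  apply congrArg
  apply List.map_congr_left
  intro j hj
  rw [hcm j (List.mem_range.mp hj)]

lemma sum_map_eq_range {α : Type} (l : List α) (d : α) (F : α → Int) (n : Nat)
    (h : l.length = n) :
    (l.map F).sum = ((List.range n).map (fun i => F (l.getD i d))).sum := by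
  subst h
  conv_lhs => rw [← map_getD_range l d]
  rw [List.map_map]
  rfl

-- pair-sum minus total, re-indexed over range, is the common double sum
lemma assemble (g : List (List Int)) (M : List Int) (hM : M.length = g.length) (C : Nat → Int) :
    (M.map (fun r => ((List.range g.length).map (fun j => min r (C j))).sum)).sum
      - (g.map (fun row => ((List.range g.length).map (fun j => row.getD j 0)).sum)).sum
    = ((List.range g.length).map (fun i =>
        ((List.range g.length).map (fun j =>
          min (M.getD i 0) (C j) - (g.getD i []).getD j 0)).sum)).sum := by
  conv_rhs => simp only [sum_map_sub]
  congr 1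
  · exact sum_map_eq_range M 0 _ g.length hM
  · exact sum_map_eq_range g [] _ g.length rfl

-- B reduces to the common double sum
lemma B_eq (grid : List (List Int)) :
    max_increase_alt grid = SSum grid := by
  unfold max_increase_alt SSum
  simp only [PySem.List.pyRange_zero_nat, List.foldl_map, List.map_map, PySem.List.pyGetD_natCast,
    Function.comp_def]
  have hterm := fun r => pair_term
      ((List.range grid.length).map (fun j => pyMaxI (grid.map (fun row => row.getD j 0)))) r
  simp only [PySem.List.pyGetD_natCast, List.length_map, List.length_range] at hterm
  simp only [hterm]
  have htot : ∀ (res : Int) (row : List Int),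
      (List.range grid.length).foldl (fun a j => a + row.getD j 0) res
        = res + ((List.range grid.length).map (fun j => row.getD j 0)).sum :=
    fun res row => foldl_add_sum _ _ _
  simp only [htot]
  rw [foldl_add_sum, foldl_add_sum, zero_add, zero_add]
  have hasm := assemble grid (grid.map (fun row => pyMaxI row)) (by simp) (colMaxAt grid)
  simp only [colMaxAt, List.map_map, Function.comp_def] at hasm ⊢
  exact hasm

-- ===== VERDICT (by name: the statement is the Claim_ definition above) =====
theorem max_increase_spec : Claim_equal_max_increase := by
  intro grid _hdom hpre
  unfold Spec_max_increase
  rw [A_eq grid hpre, B_eq grid]
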